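-- pv_equiv track=rewrite | github.com/t0r1n88/Lachesis | mental_state/shmelev_osr_razuvaeva.py | calc_value_u
-- ===== SOURCE A (Python) =====
-- def calc_value_u(row):
--     """
--     Функция для подсчета значения
--     :return: число
--     """
--     lst_pr = [1,12,14,22,27]
--     value_forward = 0  # результат
--     for idx, value in enumerate(row,1):
--         if idx in lst_pr:
--             if value == 1:
--                 value_forward += 1
--
--     return value_forward
-- ===== SOURCE B (Python) =====
-- def calc_value_u(row):
--     """
--     Функция для подсчета значения
--     :return: число
--     """
--     n = len(row)
--     return sum(1 for i in (0, 11, 13, 21, 26) if i < n and row[i] == 1)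
-- ===== Notes on version B (the rewrite author's own statement) =====
-- stated objective: faster
-- what changed: Replaces the enumerate scan over the whole row with five direct constant-time lookups at the fixed target positions.
import Mathlib
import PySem

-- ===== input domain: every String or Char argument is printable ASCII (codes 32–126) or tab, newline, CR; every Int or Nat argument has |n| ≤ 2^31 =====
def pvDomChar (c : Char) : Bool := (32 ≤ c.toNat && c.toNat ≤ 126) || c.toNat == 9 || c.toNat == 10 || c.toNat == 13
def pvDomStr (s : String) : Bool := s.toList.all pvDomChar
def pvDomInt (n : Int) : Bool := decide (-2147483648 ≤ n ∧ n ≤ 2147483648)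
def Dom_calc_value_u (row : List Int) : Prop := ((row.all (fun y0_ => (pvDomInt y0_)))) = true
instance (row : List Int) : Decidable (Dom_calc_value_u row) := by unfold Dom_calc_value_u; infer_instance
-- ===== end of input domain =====

-- B replaces A's scan over the whole row with five direct lookups at the target indices.

-- ===== PORT A =====
-- A: lst_pr = [1,12,14,22,27]; scan enumerate(row, 1), count value == 1 at idx ∈ lst_pr.
def calc_value_u (row : List Int) : Int :=
  (PySem.List.enumerate row 1).foldl
    (fun value_forward p =>
      if p.1 ∈ ([1, 12, 14, 22, 27] : List Int) then
        if p.2 = 1 then value_forward + 1 else value_forward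
      else value_forward)
    0

-- ===== PORT B =====
-- B: sum(1 for i in (0, 11, 13, 21, 26) if i < n and row[i] == 1)
def calc_value_u_alt (row : List Int) : Int :=
  ([0, 11, 13, 21, 26] : List Int).foldl
    (fun acc i =>
      if i < (row.length : Int) ∧ PySem.List.pyGet? row i = some 1 then acc + 1 else acc)
    0

-- ===== PRECONDITION & SPEC =====
def Spec_calc_value_u (row : List Int) (out : Int) : Prop := out = calc_value_u_alt row
instance (row : List Int) (out : Int) : Decidable (Spec_calc_value_u row out) := by unfold Spec_calc_value_u; infer_instance

-- ===== CLAIM (what is proved, stated in full; the proofs are below) =====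
def Claim_equal_calc_value_u : Prop := ∀ (row : List Int), Dom_calc_value_u row → Spec_calc_value_u row (calc_value_u row)

-- ===== LEMMAS AND PROOFS =====

-- contribution of a single 0-based index i to B's count
def pvBAt (row : List Int) (i : Int) : Int :=
  if i < (row.length : Int) ∧ PySem.List.pyGet? row i = some 1 then 1 else 0

-- sum of pvBAt over the targets t ∈ ts that have not yet been passed (t ≥ k), at offset t - k
def pvS : List Int → List Int → Int → Int
  | [], _, _ => 0
  | t :: ts, row, k => (if k ≤ t then pvBAt row (t - k) else 0) + pvS ts row k

theorem pvBAt_nil (i : Int) : pvBAt [] i = 0 := by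
  simp [pvBAt, PySem.List.pyGet?]

theorem pvBAt_zero_cons (v : Int) (r : List Int) :
    pvBAt (v :: r) 0 = (if v = 1 then 1 else 0) := by
  simp [pvBAt]

theorem pvBAt_cons_pos (v : Int) (r : List Int) (i : Int) (h : 1 ≤ i) :
    pvBAt (v :: r) i = pvBAt r (i - 1) := by
  obtain ⟨n, rfl⟩ : ∃ n : Nat, i = (n : Int) + 1 := ⟨(i - 1).toNat, by omega⟩
  simp only [pvBAt, PySem.List.pyGet?_cons_succ, List.length_cons, add_sub_cancel_right]
  have hiff : ((n : Int) + 1 < ((r.length + 1 : Nat) : Int)) ↔ ((n : Int) < (r.length : Int)) := by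
    push_cast; omega
  simp only [hiff]

theorem pvS_cons_row (ts : List Int) (hnd : ts.Nodup) (v : Int) (r : List Int) (k : Int) :
    pvS ts (v :: r) k =
      (if k ∈ ts then (if v = 1 then 1 else 0) else 0) + pvS ts r (k + 1) := by
  induction ts with
  | nil => simp [pvS]
  | cons t ts ih =>
    obtain ⟨hnmem, hnd'⟩ := List.nodup_cons.mp hnd
    simp only [pvS, ih hnd', List.mem_cons]
    by_cases hkt : k = t
    · subst hkt
      have hsub : k - k = (0 : Int) := by ring
      rw [if_pos (le_refl k), hsub, pvBAt_zero_cons, if_neg (by omega : ¬ k + 1 ≤ k),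
        if_neg hnmem, if_pos (Or.inl rfl : k = k ∨ k ∈ ts)]
    · rw [if_congr (or_iff_right hkt) rfl rfl]
      by_cases hkle : k ≤ t
      · have hlt : k + 1 ≤ t := by omega
        have hb : pvBAt (v :: r) (t - k) = pvBAt r (t - (k + 1)) := by
          rw [pvBAt_cons_pos v r (t - k) (by omega)]
          have : t - k - 1 = t - (k + 1) := by ring
          rw [this]
        rw [if_pos hkle, if_pos hlt, hb]
        by_cases hk : k ∈ ts
        · rw [if_pos hk]; try ring
        · rw [if_neg hk]; try ring
      · rw [if_neg hkle, if_neg (by omega : ¬ k + 1 ≤ t)]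
        by_cases hk : k ∈ ts
        · rw [if_pos hk]; try ring
        · rw [if_neg hk]; try ring

-- A's fold over enumerate(row, k) adds exactly pvS [1,12,14,22,27] row k to the accumulator
theorem pvA_fold (row : List Int) (k acc : Int) :
    (PySem.List.enumerate row k).foldl
      (fun value_forward p =>
        if p.1 ∈ ([1, 12, 14, 22, 27] : List Int) then
          if p.2 = 1 then value_forward + 1 else value_forward
        else value_forward)
      acc
    = acc + pvS ([1, 12, 14, 22, 27] : List Int) row k := by
  induction row generalizing k acc with
  | nil => simp [PySem.List.enumerate_nil, pvS, pvBAt_nil]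
  | cons v r ih =>
    rw [PySem.List.enumerate_cons, List.foldl_cons, ih,
      pvS_cons_row _ (by decide) v r k]
    by_cases hmem : k ∈ ([1, 12, 14, 22, 27] : List Int)
    · rw [if_pos hmem, if_pos hmem]
      by_cases hv : v = 1
      · rw [if_pos hv, if_pos hv]; ring
      · rw [if_neg hv, if_neg hv]; ring
    · rw [if_neg hmem, if_neg hmem]; ring

-- B's fold is the sum of the five individual contributions
theorem pvB_fold (row : List Int) (is : List Int) (acc : Int) :
    is.foldl
      (fun acc i =>
        if i < (row.length : Int) ∧ PySem.List.pyGet? row i = some 1 then acc + 1 else acc)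
      acc
    = acc + (is.map (pvBAt row)).sum := by
  induction is generalizing acc with
  | nil => simp
  | cons i is ih =>
    rw [List.foldl_cons, ih, List.map_cons, List.sum_cons]
    by_cases h : i < (row.length : Int) ∧ PySem.List.pyGet? row i = some 1
    · rw [if_pos h, pvBAt, if_pos h]; ring
    · rw [if_neg h, pvBAt, if_neg h]; ring

-- ===== VERDICT (by name: the statement is the Claim_ definition above) =====
theorem calc_value_u_spec : Claim_equal_calc_value_u := by
  intro row _
  show calc_value_u row = calc_value_u_alt row
  rw [calc_value_u, pvA_fold row 1 0, calc_value_u_alt, pvB_fold row _ 0]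
  simp only [pvS, List.map_cons, List.map_nil, List.sum_cons, List.sum_nil]
  norm_num
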